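-- pv_equiv track=rewrite | github.com/AntoineR97/Pattern-Square | localDecomp.py | responseFunc
-- ===== SOURCE A (Python) =====
-- def responseFunc(inter, C):
--     p = []
--     count = 0
--     for output in [0, 1]:
--         inter1 = []
--         for lhv1 in range(C):
--             inter2 = []
--             for lhv2 in range(C):
--                 inter2.append(inter[count])
--                 count = count+1
--             inter1.append(inter2)
--         p.append(inter1)
--     return p
-- ===== SOURCE B (Python) =====
-- def responseFunc(inter, C):
--     # index-arithmetic reshape: each inner row is one contiguous slice
--     return [[list(inter[(o * C + i) * C:(o * C + i) * C + C]) for i in range(C)]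
--             for o in range(2)]
-- ===== Notes on version B (the rewrite author's own statement) =====
-- stated objective: simpler
-- what changed: Replaced the triple nested loop with a running counter by two comprehensions whose inner rows are single contiguous slices computed from index arithmetic (no mutable counter, no element-by-element appends).
import Mathlib
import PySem

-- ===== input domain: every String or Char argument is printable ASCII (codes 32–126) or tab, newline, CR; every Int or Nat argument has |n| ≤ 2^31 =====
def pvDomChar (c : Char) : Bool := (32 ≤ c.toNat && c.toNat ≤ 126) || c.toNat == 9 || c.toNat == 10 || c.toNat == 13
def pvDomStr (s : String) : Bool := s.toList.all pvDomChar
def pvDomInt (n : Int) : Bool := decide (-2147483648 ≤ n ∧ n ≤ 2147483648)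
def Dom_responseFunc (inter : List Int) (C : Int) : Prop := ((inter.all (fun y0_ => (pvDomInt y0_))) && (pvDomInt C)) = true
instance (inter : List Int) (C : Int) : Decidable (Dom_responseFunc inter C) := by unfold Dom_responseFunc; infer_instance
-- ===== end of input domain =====

-- B replaces A's triple loop with a running counter by comprehensions whose rows are
-- contiguous slices at arithmetically derived offsets (objective: simpler).

-- ===== PORT A =====
-- inter[count] is pyGetD; Pre_ excludes the out-of-range counts where Python raises IndexError.
def responseFunc (inter : List Int) (C : Int) : List (List (List Int)) :=
  (([0, 1] : List Int).foldl
    (fun (s : List (List (List Int)) × Int) _output =>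
      let r1 := (PySem.List.pyRange 0 C 1).foldl
        (fun (s1 : List (List Int) × Int) _lhv1 =>
          let r2 := (PySem.List.pyRange 0 C 1).foldl
            (fun (s2 : List Int × Int) _lhv2 =>
              (s2.1 ++ [PySem.List.pyGetD inter s2.2 0], s2.2 + 1))
            ([], s1.2)
          (s1.1 ++ [r2.1], r2.2))
        ([], s.2)
      (s.1 ++ [r1.1], r1.2))
    ([], 0)).1

-- ===== PORT B =====
def responseFunc_alt (inter : List Int) (C : Int) : List (List (List Int)) :=
  (PySem.List.pyRange 0 2 1).map (fun o =>
    (PySem.List.pyRange 0 C 1).map (fun i =>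
      PySem.List.slice inter (some ((o * C + i) * C)) (some ((o * C + i) * C + C))))

-- ===== PRECONDITION & SPEC =====
-- Pre_ excludes exactly the inputs where A raises IndexError: C > 0 with fewer than 2*C*C elements.
def Pre_responseFunc (inter : List Int) (C : Int) : Prop :=
  C ≤ 0 ∨ 2 * C * C ≤ (inter.length : Int)
instance (inter : List Int) (C : Int) : Decidable (Pre_responseFunc inter C) := by
  unfold Pre_responseFunc; infer_instance
def pvWitness_responseFunc : List Int × Int := ([1, 2, 3, 4, 5, 6, 7, 8], 2)

def Spec_responseFunc (inter : List Int) (C : Int) (out : List (List (List Int))) : Prop := out = responseFunc_alt inter C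
instance (inter : List Int) (C : Int) (out : List (List (List Int))) : Decidable (Spec_responseFunc inter C out) := by unfold Spec_responseFunc; infer_instance

-- ===== CLAIM (what is proved, stated in full; the proofs are below) =====
def Claim_equal_responseFunc : Prop := ∀ (inter : List Int) (C : Int), Dom_responseFunc inter C → Pre_responseFunc inter C → Spec_responseFunc inter C (responseFunc inter C)

-- ===== LEMMAS AND PROOFS =====

-- A's innermost loop from counter ct appends the n elements inter[ct..ct+n-1] and advances ct by n.
theorem pvInner (inter : List Int) (n : Nat) :
    ∀ (acc : List Int) (ct : Int),
    (PySem.List.pyRange 0 (n : Int) 1).foldl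
      (fun (s2 : List Int × Int) _ =>
        (s2.1 ++ [PySem.List.pyGetD inter s2.2 0], s2.2 + 1)) (acc, ct)
    = (acc ++ (List.range n).map (fun (j : Nat) => PySem.List.pyGetD inter (ct + (j:Int)) 0), ct + n) := by
  induction n with
  | zero => intro acc ct; simp [PySem.List.pyRange_one_eq_nil]
  | succ n ih =>
      intro acc ct
      rw [show ((n + 1 : Nat) : Int) = (n : Int) + 1 by push_cast; ring,
          PySem.List.pyRange_one_succ_right (by positivity : (0:Int) ≤ (n:Int)), List.foldl_append, ih]
      simp [List.range_succ]
      push_cast; ring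

-- In range, that element list is the contiguous slice inter[ct:ct+n].
theorem pvSliceEq (inter : List Int) (n : Nat) (ct : Int) (h0 : 0 ≤ ct)
    (hlen : ct.toNat + n ≤ inter.length) :
    (List.range n).map (fun (j : Nat) => PySem.List.pyGetD inter (ct + (j:Int)) 0)
      = PySem.List.slice inter (some ct) (some (ct + n)) := by
  rw [PySem.List.slice_toNat inter h0 (by omega : (0:Int) ≤ ct + (n:Int))]
  have htn : (ct + n).toNat - ct.toNat = n := by omega
  rw [htn]
  apply List.ext_getElem
  · simp; omega
  · intro k hk1 hk2
    simp only [List.getElem_map, List.getElem_range, List.getElem_take, List.getElem_drop]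
    rw [PySem.List.pyGetD_eq_getElem inter 0 (by omega) (by simp at hk1; omega)]
    congr 1
    simp at hk1
    omega

-- A's middle loop from counter ct builds m slice-rows of width n and advances ct by m*n.
theorem pvMid (inter : List Int) (n : Nat) (m : Nat) :
    ∀ (acc : List (List Int)) (ct : Int), 0 ≤ ct → ct.toNat + m * n ≤ inter.length →
    (PySem.List.pyRange 0 (m : Int) 1).foldl
      (fun (s1 : List (List Int) × Int) _ =>
        let r2 := (PySem.List.pyRange 0 (n : Int) 1).foldl
          (fun (s2 : List Int × Int) _ =>
            (s2.1 ++ [PySem.List.pyGetD inter s2.2 0], s2.2 + 1))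
          ([], s1.2)
        (s1.1 ++ [r2.1], r2.2)) (acc, ct)
    = (acc ++ (List.range m).map
        (fun (i : Nat) => PySem.List.slice inter (some (ct + (i:Int) * n)) (some (ct + (i:Int) * n + n))),
       ct + m * n) := by
  induction m with
  | zero => intro acc ct _ _; simp [PySem.List.pyRange_one_eq_nil]
  | succ m ih =>
      intro acc ct h0 hlen
      rw [show ((m + 1 : Nat) : Int) = (m : Int) + 1 by push_cast; ring,
          PySem.List.pyRange_one_succ_right (by positivity : (0:Int) ≤ (m:Int)), List.foldl_append,
          ih acc ct h0 (by nlinarith [hlen])]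
      simp only [List.foldl_cons, List.foldl_nil]
      rw [pvInner inter n [] (ct + m * n)]
      rw [pvSliceEq inter n (ct + m * n) (by positivity)
            (by have : (ct + (m:Int) * n).toNat = ct.toNat + m * n := by push_cast; omega
                rw [this]; nlinarith [hlen])]
      simp [List.range_succ]
      push_cast; ring

-- Each block of A equals B's comprehension row list for output o.
theorem pvRow (inter : List Int) (n : Nat) (o ct : Int) (h : ct = o * n * n) :
    (List.range n).map (fun (i : Nat) => PySem.List.slice inter (some (ct + (i:Int) * n)) (some (ct + (i:Int) * n + n)))
      = (PySem.List.pyRange 0 (n : Int) 1).map (fun i =>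
          PySem.List.slice inter (some ((o * n + i) * n)) (some ((o * n + i) * n + n))) := by
  rw [PySem.List.pyRange_one, List.map_map]
  apply List.map_congr_left
  intro k _
  subst h
  simp only [Function.comp_apply]
  congr 2 <;> push_cast <;> ring

-- ===== VERDICT (by name: the statement is the Claim_ definition above) =====
theorem responseFunc_spec : Claim_equal_responseFunc := by
  intro inter C _hdom hpre
  unfold Spec_responseFunc responseFunc responseFunc_alt
  by_cases hC : C ≤ 0
  · simp [PySem.List.pyRange_one_eq_nil hC, show PySem.List.pyRange 0 2 1 = [0,1] from rfl]
  · push_neg at hC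
    obtain ⟨n, hn⟩ : ∃ n : Nat, C = (n : Int) := ⟨C.toNat, by omega⟩
    subst hn
    have hlen : 2 * n * n ≤ inter.length := by
      rcases hpre with h | h
      · omega
      · exact_mod_cast (by push_cast at h ⊢; nlinarith : ((2 * n * n : Nat) : Int) ≤ (inter.length : Int))
    have h1 := pvMid inter n n [] 0 le_rfl (by simpa using Nat.le_trans (by nlinarith) hlen)
    have h2 := pvMid inter n n [] (0 + (n : Int) * (n : Int)) (by positivity)
      (by have : ((0 + (n:Int) * n)).toNat = n * n := by push_cast; omega
          rw [this]; nlinarith [hlen])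
    simp only [List.foldl_cons, List.foldl_nil]
    rw [h1]
    simp only
    rw [h2]
    simp only [show PySem.List.pyRange 0 2 1 = [0,1] from rfl, List.map_cons, List.map_nil,
      List.nil_append]
    rw [pvRow inter n 0 0 (by ring), pvRow inter n 1 (0 + (n:Int) * n) (by ring)]
    rfl
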